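-- pv_equiv track=rewrite | github.com/hsinwu13/Developing-a-Step-by-Step-Solver-based-on-Cognitive-Arithmetic-and-Different-Arithmetic-Strategy | weight/sub_weight.py | borrow_list
-- ===== SOURCE A (Python) =====
-- def borrow_list(list1, list2):
--     diff_int_list = []
--     borrow_int_list = [0]
--
--     if len(list1) < len(list2):
--         list1, list2 = list2, list1
--
--     for i in range(len(list2)):
--         diff_int_list.append(list1[i] - list2[i] - borrow_int_list[i])
--         borrow_int_list.append({True: 1, False: 0}[diff_int_list[i] < 0])
--
--     for i in range(len(list2), len(list1)):
--         diff_int_list.append(list1[i] - borrow_int_list[i])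
--         borrow_int_list.append({True: 1, False: 0}[diff_int_list[i] < 0])
--
--     borrow_int_list.append(borrow_int_list.pop(0))
--
--     return borrow_int_list
-- ===== SOURCE B (Python) =====
-- def borrow_list(list1, list2):
--     # Different characterization: the borrow after position i equals 1 exactly when
--     # the LAST nonzero per-digit difference among positions 0..i is negative.
--     # Stage 1 builds the raw difference list (missing subtrahend digits count as 0);
--     # stage 2 forward-fills that last-nonzero sign. No borrow is ever subtracted
--     # from a digit or compared against.
--     a, b = (list2, list1) if len(list1) < len(list2) else (list1, list2)
--     ds = [x - y for x, y in zip(a, b)] + a[len(b):]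
--     out = []
--     sign = 0
--     for d in ds:
--         if d != 0:
--             sign = 1 if d < 0 else 0
--         out.append(sign)
--     out.append(0)
--     return out
-- ===== Notes on version B (the rewrite author's own statement) =====
-- stated objective: alternative
-- what changed: Replaces A's borrow-propagation recurrence (subtracting the running borrow from each digit over an indexed borrow-history list, plus a final pop(0)/append rotate) with a two-stage method: first build the raw per-digit difference list, then forward-fill the sign of the last nonzero difference, which equals the borrow.
import Mathlib
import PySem

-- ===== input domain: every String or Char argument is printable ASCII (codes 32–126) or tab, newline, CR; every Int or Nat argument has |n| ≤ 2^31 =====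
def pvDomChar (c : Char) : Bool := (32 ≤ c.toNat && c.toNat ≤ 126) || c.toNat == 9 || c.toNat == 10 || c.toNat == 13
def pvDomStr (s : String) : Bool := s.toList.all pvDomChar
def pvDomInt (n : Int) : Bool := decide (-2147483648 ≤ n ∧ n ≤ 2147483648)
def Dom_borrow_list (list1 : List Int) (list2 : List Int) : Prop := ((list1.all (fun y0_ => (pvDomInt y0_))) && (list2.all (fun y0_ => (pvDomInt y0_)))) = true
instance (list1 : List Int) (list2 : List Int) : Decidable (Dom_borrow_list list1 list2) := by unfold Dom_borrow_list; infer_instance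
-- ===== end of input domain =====

-- B computes the borrows by a different characterization: build the raw per-digit
-- difference list first, then forward-fill the sign of the last nonzero difference
-- (alternative decomposition; no borrow is ever subtracted from a digit).

-- ===== PORT A =====
-- state = (diff_int_list, borrow_int_list); indices are always in range, so pyGetD with
-- default 0 is exact for list1[i] / list2[i] / borrow_int_list[i] / diff_int_list[i].
def pvStep1 (a b : List Int) (st : List Int × List Int) (i : Int) : List Int × List Int :=
  let ds := st.1 ++ [PySem.List.pyGetD a i 0 - PySem.List.pyGetD b i 0 - PySem.List.pyGetD st.2 i 0]
  (ds, st.2 ++ [if PySem.List.pyGetD ds i 0 < 0 then 1 else 0])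

def pvStep2 (a : List Int) (st : List Int × List Int) (i : Int) : List Int × List Int :=
  let ds := st.1 ++ [PySem.List.pyGetD a i 0 - PySem.List.pyGetD st.2 i 0]
  (ds, st.2 ++ [if PySem.List.pyGetD ds i 0 < 0 then 1 else 0])

def borrow_list (list1 : List Int) (list2 : List Int) : List Int :=
  let p := if list1.length < list2.length then (list2, list1) else (list1, list2)
  let st1 := (PySem.List.pyRange 0 p.2.length 1).foldl (pvStep1 p.1 p.2) ([], [0])
  let st2 := (PySem.List.pyRange p.2.length p.1.length 1).foldl (pvStep2 p.1) st1
  -- borrow_int_list.append(borrow_int_list.pop(0)) on a nonempty list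
  st2.2.tail ++ st2.2.take 1

-- ===== PORT B =====
-- stage 2 of Source B: "for d in ds: if d != 0: sign = 1 if d < 0 else 0; out.append(sign)"
def pvFill : List Int → Int → List Int
  | [], _ => []
  | d :: ds, sign =>
      let s := if d ≠ 0 then (if d < 0 then (1 : Int) else 0) else sign
      s :: pvFill ds s

def borrow_list_alt (list1 : List Int) (list2 : List Int) : List Int :=
  let p := if list1.length < list2.length then (list2, list1) else (list1, list2)
  -- stage 1: ds = [x - y for x, y in zip(a, b)] + a[len(b):]
  let ds := List.zipWith (fun x y => x - y) p.1 p.2 ++ p.1.drop p.2.length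
  pvFill ds 0 ++ [0]

-- ===== PRECONDITION & SPEC =====
def Spec_borrow_list (list1 : List Int) (list2 : List Int) (out : List Int) : Prop := out = borrow_list_alt list1 list2
instance (list1 : List Int) (list2 : List Int) (out : List Int) : Decidable (Spec_borrow_list list1 list2 out) := by unfold Spec_borrow_list; infer_instance

-- ===== CLAIM (what is proved, stated in full; the proofs are below) =====
def Claim_equal_borrow_list : Prop := ∀ (list1 : List Int) (list2 : List Int), Dom_borrow_list list1 list2 → Spec_borrow_list list1 list2 (borrow_list list1 list2)

-- ===== LEMMAS AND PROOFS =====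

-- A's next borrow (if d - s < 0) equals B's fill step (hold s on d = 0, else sign of d),
-- whenever the running borrow s is 0 or 1.
theorem step_eq (d s : Int) (hs : s = 0 ∨ s = 1) :
    (if d - s < 0 then (1 : Int) else 0)
      = (if d ≠ 0 then (if d < 0 then (1 : Int) else 0) else s) := by
  rcases hs with h | h <;> subst h <;> split_ifs <;> omega

-- The second loop of A, from index i to the end of a, appends exactly what pvFill
-- computes on the remaining digits, seeded with the last borrow recorded so far.
theorem loop2_eq (a : List Int) (i : Nat) (st : List Int × List Int)
    (hi : i ≤ a.length) (h1 : st.1.length = i) (h2 : st.2.length = i + 1)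
    (hs : st.2.getD i 0 = 0 ∨ st.2.getD i 0 = 1) :
    ((PySem.List.pyRange (i : Int) (a.length : Int) 1).foldl (pvStep2 a) st).2
      = st.2 ++ pvFill (a.drop i) (st.2.getD i 0) := by
  induction hk : a.length - i generalizing i st with
  | zero =>
      have hie : i = a.length := by omega
      subst hie
      rw [PySem.List.pyRange_one_eq_nil (by omega)]
      simp [pvFill]
  | succ k ih =>
      have hlt : i < a.length := by omega
      rw [PySem.List.pyRange_one_cons (by exact_mod_cast hlt)]
      simp only [List.foldl_cons]
      have hstep : pvStep2 a st (i : Int)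
          = (st.1 ++ [a[i] - st.2.getD i 0],
             st.2 ++ [if a[i] - st.2.getD i 0 < 0 then (1:Int) else 0]) := by
        simp only [pvStep2, PySem.List.pyGetD_natCast]
        have hds : (st.1 ++ [a.getD i 0 - st.2.getD i 0]).getD i 0
            = a.getD i 0 - st.2.getD i 0 := by
          rw [List.getD_eq_getElem?_getD, List.getElem?_append_right (by omega)]
          simp [h1]
        rw [hds]
        simp [List.getD_eq_getElem?_getD, List.getElem?_eq_getElem hlt]
      have hcast : ((i : Int) + 1) = ((i + 1 : Nat) : Int) := by push_cast; ring
      have hlast : (st.2 ++ [if a[i] - st.2.getD i 0 < 0 then (1:Int) else 0]).getD (i+1) 0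
          = if a[i] - st.2.getD i 0 < 0 then (1:Int) else 0 := by
        rw [List.getD_eq_getElem?_getD, List.getElem?_append_right (by omega)]
        simp [h2]
      rw [hstep, hcast,
        ih (i + 1) _ (by omega) (by simp [h1]) (by simp [h2])
          (by rw [hlast]; split_ifs <;> simp) (by omega)]
      have hdrop : a.drop i = a[i] :: a.drop (i + 1) := (List.getElem_cons_drop hlt).symm
      rw [hlast, hdrop]
      simp only [pvFill]
      rw [step_eq _ _ hs]
      simp

-- Both of A's loops together, from index i, append exactly what pvFill computes on the
-- remaining raw differences, seeded with the last borrow recorded so far.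
theorem loops_eq (a b : List Int) (hb : b.length ≤ a.length) (i : Nat)
    (st : List Int × List Int)
    (hi : i ≤ b.length) (h1 : st.1.length = i) (h2 : st.2.length = i + 1)
    (hs : st.2.getD i 0 = 0 ∨ st.2.getD i 0 = 1) :
    ((PySem.List.pyRange (b.length : Int) (a.length : Int) 1).foldl (pvStep2 a)
      ((PySem.List.pyRange (i : Int) (b.length : Int) 1).foldl (pvStep1 a b) st)).2
      = st.2 ++ pvFill (List.zipWith (fun x y => x - y) (a.drop i) (b.drop i)
          ++ a.drop b.length) (st.2.getD i 0) := by
  induction hk : b.length - i generalizing i st with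
  | zero =>
      have hie : i = b.length := by omega
      subst hie
      rw [PySem.List.pyRange_one_eq_nil (by omega)]
      simp only [List.foldl_nil, List.drop_length, List.zipWith_nil_right, List.nil_append]
      exact loop2_eq a b.length st hb h1 h2 hs
  | succ k ih =>
      have hlt : i < b.length := by omega
      have hlt' : i < a.length := by omega
      rw [PySem.List.pyRange_one_cons (by exact_mod_cast hlt)]
      simp only [List.foldl_cons]
      have hstep : pvStep1 a b st (i : Int)
          = (st.1 ++ [a[i] - b[i] - st.2.getD i 0],
             st.2 ++ [if a[i] - b[i] - st.2.getD i 0 < 0 then (1:Int) else 0]) := by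
        simp only [pvStep1, PySem.List.pyGetD_natCast]
        have hds : (st.1 ++ [a.getD i 0 - b.getD i 0 - st.2.getD i 0]).getD i 0
            = a.getD i 0 - b.getD i 0 - st.2.getD i 0 := by
          rw [List.getD_eq_getElem?_getD, List.getElem?_append_right (by omega)]
          simp [h1]
        rw [hds]
        simp [List.getD_eq_getElem?_getD, List.getElem?_eq_getElem hlt,
          List.getElem?_eq_getElem hlt']
      have hcast : ((i : Int) + 1) = ((i + 1 : Nat) : Int) := by push_cast; ring
      have hlast : (st.2 ++ [if a[i] - b[i] - st.2.getD i 0 < 0 then (1:Int) else 0]).getD (i+1) 0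
          = if a[i] - b[i] - st.2.getD i 0 < 0 then (1:Int) else 0 := by
        rw [List.getD_eq_getElem?_getD, List.getElem?_append_right (by omega)]
        simp [h2]
      rw [hstep, hcast,
        ih (i + 1) _ (by omega) (by simp [h1]) (by simp [h2])
          (by rw [hlast]; split_ifs <;> simp) (by omega)]
      have hdropa : a.drop i = a[i] :: a.drop (i + 1) := (List.getElem_cons_drop hlt').symm
      have hdropb : b.drop i = b[i] :: b.drop (i + 1) := (List.getElem_cons_drop hlt).symm
      rw [hlast, hdropa, hdropb]
      simp only [List.zipWith_cons_cons, List.cons_append, pvFill]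
      rw [step_eq _ _ hs]
      simp

-- whole-program core: on (a, b) with b.length ≤ a.length, A's rotated borrow list
-- equals B's pvFill of the raw differences followed by the trailing 0.
theorem core_eq (a b : List Int) (hb : b.length ≤ a.length) :
    (((PySem.List.pyRange (b.length : Int) (a.length : Int) 1).foldl (pvStep2 a)
      ((PySem.List.pyRange 0 (b.length : Int) 1).foldl (pvStep1 a b) ([], [0]))).2).tail
      ++ (((PySem.List.pyRange (b.length : Int) (a.length : Int) 1).foldl (pvStep2 a)
      ((PySem.List.pyRange 0 (b.length : Int) 1).foldl (pvStep1 a b) ([], [0]))).2).take 1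
      = pvFill (List.zipWith (fun x y => x - y) a b ++ a.drop b.length) 0 ++ [0] := by
  have h := loops_eq a b hb 0 ([], [0]) (by omega) rfl rfl (by simp)
  simp only [Nat.cast_zero, List.drop_zero] at h
  rw [h]
  simp

-- ===== VERDICT (by name: the statement is the Claim_ definition above) =====
theorem borrow_list_spec : Claim_equal_borrow_list := by
  intro list1 list2 _
  show borrow_list list1 list2 = borrow_list_alt list1 list2
  unfold borrow_list borrow_list_alt
  by_cases h : list1.length < list2.length
  · simp only [h, if_true]
    exact core_eq list2 list1 (le_of_lt h)
  · simp only [h, if_false]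
    exact core_eq list1 list2 (by omega)
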